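-- pv_equiv track=rewrite | github.com/majosaurus/uni-garbage | ib113/hw_03.py | censorship
-- ===== SOURCE A (Python) =====
-- def censorship(text):
--     censored_text = ""
--
--     for i in range(len(text)):
--         if i % 2 == 0:
--             censored_text += text[i]
--         if i % 2 == 1:
--             censored_text += "X"
--
--     return censored_text
-- ===== SOURCE B (Python) =====
-- def censorship(text):
--     chars = list(text)
--     chars[1::2] = "X" * len(chars[1::2])
--     return "".join(chars)
-- ===== Notes on version B (the rewrite author's own statement) =====
-- stated objective: idiomatic
-- what changed: B builds a char list and overwrites all odd positions at once with one strided slice assignment, then joins, instead of A's index loop with per-index parity tests and repeated string concatenation.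
import Mathlib
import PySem

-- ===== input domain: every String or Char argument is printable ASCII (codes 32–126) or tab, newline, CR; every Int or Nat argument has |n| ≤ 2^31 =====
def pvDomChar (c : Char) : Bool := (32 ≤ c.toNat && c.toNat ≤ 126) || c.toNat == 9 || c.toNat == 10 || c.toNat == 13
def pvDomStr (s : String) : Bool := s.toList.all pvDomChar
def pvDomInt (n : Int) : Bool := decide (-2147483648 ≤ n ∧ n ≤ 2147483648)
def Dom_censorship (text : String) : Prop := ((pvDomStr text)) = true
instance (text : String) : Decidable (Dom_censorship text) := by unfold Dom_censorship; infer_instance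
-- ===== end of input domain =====

-- B replaces A's per-index parity loop by one bulk "every second position becomes 'X'" pass (idiomatic).

-- ===== PORT A =====
-- one iteration of A's loop body: both ifs checked in order; text[i] is always in
-- range here, so the .getD [] totalization is never the value used
def censorshipStep (cs : List Char) (acc : List Char) (i : Int) : List Char :=
  let acc1 := if PySem.Int.mod i 2 = 0
              then acc ++ (((PySem.List.pyGet? cs i).map (fun c => [c])).getD [])
              else acc
  if PySem.Int.mod i 2 = 1 then acc1 ++ ['X'] else acc1

def censorship (text : String) : String :=
  String.mk ((PySem.List.pyRange 0 (PySem.Str.len text) 1).foldl (censorshipStep text.toList) [])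

-- ===== PORT B =====
-- exact port of the strided slice assignment chars[1::2] = "X" * …: keep the char at
-- each even position, write 'X' at each odd one (two positions per step)
def censorStride : List Char → List Char
  | [] => []
  | [c] => [c]
  | a :: _ :: rest => a :: 'X' :: censorStride rest

def censorship_alt (text : String) : String := String.mk (censorStride text.toList)

-- ===== PRECONDITION & SPEC =====
def Spec_censorship (text : String) (out : String) : Prop := out = censorship_alt text
instance (text : String) (out : String) : Decidable (Spec_censorship text out) := by unfold Spec_censorship; infer_instance

-- ===== CLAIM (what is proved, stated in full; the proofs are below) =====
def Claim_equal_censorship : Prop := ∀ (text : String), Dom_censorship text → Spec_censorship text (censorship text)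

-- ===== LEMMAS AND PROOFS =====

lemma censorship_loop (rest : List Char) : ∀ (pre acc : List Char), pre.length % 2 = 0 →
    (PySem.List.pyRange (pre.length : Int) ((pre ++ rest).length : Int) 1).foldl
      (censorshipStep (pre ++ rest)) acc = acc ++ censorStride rest := by
  induction rest using censorStride.induct with
  | case1 =>
      intro pre acc _
      simp [PySem.List.pyRange_one_eq_nil, censorStride]
  | case2 c =>
      intro pre acc hpre
      have h1 : ((pre ++ [c]).length : Int) = (pre.length : Int) + 1 := by
        simp
      rw [h1, PySem.List.pyRange_one_singleton]
      have h0 : PySem.Int.mod (pre.length : Int) 2 = 0 := by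
        rw [PySem.Int.mod_eq_emod_of_pos (by omega)]; omega
      have hne : PySem.Int.mod (pre.length : Int) 2 ≠ 1 := by rw [h0]; decide
      simp only [censorshipStep, List.foldl_cons, List.foldl_nil]
      rw [if_pos h0, if_neg hne, PySem.List.pyGet?_append_length]
      simp [censorStride]
  | case3 a b rest ih =>
      intro pre acc hpre
      have hlen : ((pre ++ a :: b :: rest).length : Int)
          = ((pre ++ [a, b]).length : Int) + (rest.length : Int) := by simp; omega
      have hlt1 : (pre.length : Int) < ((pre ++ a :: b :: rest).length : Int) := by simp; omega
      have hlt2 : (pre.length : Int) + 1 < ((pre ++ a :: b :: rest).length : Int) := by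
        simp only [List.length_append, List.length_cons]; omega
      rw [PySem.List.pyRange_one_cons hlt1, PySem.List.pyRange_one_cons hlt2]
      have h0 : PySem.Int.mod (pre.length : Int) 2 = 0 := by
        rw [PySem.Int.mod_eq_emod_of_pos (by omega)]; omega
      have h1 : PySem.Int.mod ((pre.length : Int) + 1) 2 = 1 := by
        rw [PySem.Int.mod_eq_emod_of_pos (by omega)]; omega
      have hstep1 : censorshipStep (pre ++ a :: b :: rest) acc (pre.length : Int)
          = acc ++ [a] := by
        have hne : PySem.Int.mod (pre.length : Int) 2 ≠ 1 := by rw [h0]; decide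
        simp only [censorshipStep]
        rw [if_pos h0, if_neg hne, PySem.List.pyGet?_append_length]
        simp
      have hstep2 : censorshipStep (pre ++ a :: b :: rest) (acc ++ [a]) ((pre.length : Int) + 1)
          = acc ++ [a, 'X'] := by
        have hne : PySem.Int.mod ((pre.length : Int) + 1) 2 ≠ 0 := by rw [h1]; decide
        simp only [censorshipStep]
        rw [if_neg hne, if_pos h1]
        simp
      rw [List.foldl_cons, List.foldl_cons, hstep1, hstep2]
      have hpre2 : (pre ++ [a, b]).length % 2 = 0 := by simp; omega
      have hassoc : pre ++ a :: b :: rest = (pre ++ [a, b]) ++ rest := by simp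
      have hstart : ((pre ++ [a, b]).length : Int) = (pre.length : Int) + 1 + 1 := by
        simp; omega
      have := ih (pre ++ [a, b]) (acc ++ [a, 'X']) hpre2
      rw [hstart, ← hassoc] at this
      rw [this, censorStride]
      simp

-- ===== VERDICT (by name: the statement is the Claim_ definition above) =====
theorem censorship_spec : Claim_equal_censorship := by
  intro text _
  unfold Spec_censorship censorship censorship_alt
  have h := censorship_loop text.toList [] [] (by simp)
  rw [List.nil_append, List.nil_append] at h
  rw [show PySem.Str.len text = ((text.toList.length : Nat) : Int) from PySem.Str.len_eq text]
  simp only [List.length_nil, Nat.cast_zero] at h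
  exact congrArg String.mk h
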